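-- pv_equiv track=rewrite | github.com/YUJBAI/DataStoragePlanning | webapp/website/__init__.py | data_correction
-- ===== SOURCE A (Python) =====
-- def data_correction(data):
--     """
--     A function to correct the data formatting.
--
--     PARAMETERS
--     ----------
--         data : List
--             List of List of data generation after additional storage.
--
--     RETURNS
--     -------
--         tmp : List
--             List of List of corrected data.
--
--     Creator : Gilbert Putra, harlimgilbert@gmail.com
--     """
--     for i in range(1, len(data)):
--         prev_row = data[i - 1]
--         curr_row = data[i]
--
--         if prev_row[1] != '' and curr_row[1] != prev_row[1] + curr_row[2]:
--             curr_row[1] = prev_row[1] + curr_row[2]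
--
--     tmp = [[data[0][0], data[0][1]]]
--     for i in range(1, len(data)):
--         prev_row = data[i - 1]
--         curr_row = data[i]
--
--         if curr_row[3] == 'a':
--             tmp.append([curr_row[0], prev_row[1]])
--             tmp.append([curr_row[0], curr_row[1]])
--         elif curr_row[3] == 'o':
--             tmp.append([curr_row[0], curr_row[1]])
--
--     return tmp
-- ===== SOURCE B (Python) =====
-- def data_correction(data):
--     # Single pass, no mutation of `data` (A corrects data in place; only the
--     # return value is claimed equivalent).  The corrected column-1 value is
--     # carried along as `prev1` instead of being written back into the rows.
--     first = data[0]
--     tmp = [[first[0], first[1]]]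
--     prev1 = first[1]
--     for row in data[1:]:
--         cur1 = row[1] if prev1 == '' else prev1 + row[2]
--         if row[3] == 'a':
--             tmp.append([row[0], prev1])
--             tmp.append([row[0], cur1])
--         elif row[3] == 'o':
--             tmp.append([row[0], cur1])
--         prev1 = cur1
--     return tmp
-- ===== Notes on version B (the rewrite author's own statement) =====
-- stated objective: simpler
-- what changed: B replaces A's two index loops and in-place correction of data with a single non-mutating pass that threads the corrected column-1 value through an accumulator variable; only the return value is equivalent (A mutates its argument, B does not).
import Mathlib
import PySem

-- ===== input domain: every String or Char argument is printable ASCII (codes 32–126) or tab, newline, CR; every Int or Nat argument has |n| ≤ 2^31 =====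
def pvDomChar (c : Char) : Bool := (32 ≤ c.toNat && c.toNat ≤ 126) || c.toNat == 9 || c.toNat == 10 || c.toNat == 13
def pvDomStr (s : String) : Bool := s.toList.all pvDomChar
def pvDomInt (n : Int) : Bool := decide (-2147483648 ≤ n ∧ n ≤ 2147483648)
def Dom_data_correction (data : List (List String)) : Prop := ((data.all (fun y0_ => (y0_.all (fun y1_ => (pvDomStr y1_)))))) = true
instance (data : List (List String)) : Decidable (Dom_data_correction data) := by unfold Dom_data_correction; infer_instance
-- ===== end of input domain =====

-- B is a single non-mutating pass that threads the corrected column-1 value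
-- through an accumulator, instead of A's two index loops with in-place
-- correction of `data`; only the RETURN value is claimed equivalent (A
-- mutates its argument, B does not).

-- ===== PORT A =====
-- First loop of A: data[i] is corrected in place from data[i-1].
-- Hand port of the index loop `for i in range(1, len(data))`: foldl over
-- List.range' 1 (len-1); row accesses are in range under Pre_, getD is exact there.
def pyStep1 (d : List (List String)) (i : Nat) : List (List String) :=
  let prev := d.getD (i - 1) []
  let curr := d.getD i []
  if prev.getD 1 "" ≠ "" ∧ curr.getD 1 "" ≠ prev.getD 1 "" ++ curr.getD 2 "" then
    d.set i (curr.set 1 (prev.getD 1 "" ++ curr.getD 2 ""))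
  else d

-- Second loop of A: emit rows from the corrected data.
def pyStep2 (d : List (List String)) (tmp : List (List String)) (i : Nat) : List (List String) :=
  let prev := d.getD (i - 1) []
  let curr := d.getD i []
  if curr.getD 3 "" = "a" then
    tmp ++ [[curr.getD 0 "", prev.getD 1 ""], [curr.getD 0 "", curr.getD 1 ""]]
  else if curr.getD 3 "" = "o" then
    tmp ++ [[curr.getD 0 "", curr.getD 1 ""]]
  else tmp

def data_correction (data : List (List String)) : List (List String) :=
  let d := (List.range' 1 (data.length - 1)).foldl pyStep1 data
  let tmp := [[(d.getD 0 []).getD 0 "", (d.getD 0 []).getD 1 ""]]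
  (List.range' 1 (d.length - 1)).foldl (pyStep2 d) tmp

-- ===== PORT B =====
def emitB (prev1 : String) : List (List String) → List (List String)
  | [] => []
  | r :: rs =>
    let cur1 := if prev1 = "" then r.getD 1 "" else prev1 ++ r.getD 2 ""
    (if r.getD 3 "" = "a" then [[r.getD 0 "", prev1], [r.getD 0 "", cur1]]
     else if r.getD 3 "" = "o" then [[r.getD 0 "", cur1]]
     else []) ++ emitB cur1 rs

def data_correction_alt (data : List (List String)) : List (List String) :=
  match data with
  | [] => []  -- Source B raises here (data[0]); outside Pre_
  | first :: rest => [first.getD 0 "", first.getD 1 ""] :: emitB (first.getD 1 "") rest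

-- ===== PRECONDITION & SPEC =====
-- A raises IndexError on empty data, on a first row shorter than 2, or on a
-- later row shorter than 4 (row[3] is always read); Pre_ excludes exactly those.
def Pre_data_correction (data : List (List String)) : Prop :=
  data ≠ [] ∧ 2 ≤ (data.headD []).length ∧ ∀ r ∈ data.tail, 4 ≤ r.length
instance (data : List (List String)) : Decidable (Pre_data_correction data) := by
  unfold Pre_data_correction; infer_instance
def pvWitness_data_correction : List (List String) :=
  [["t0", "s"], ["t1", "x", "y", "a"], ["t2", "", "z", "o"]]
def Spec_data_correction (data : List (List String)) (out : List (List String)) : Prop := out = data_correction_alt data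
instance (data : List (List String)) (out : List (List String)) : Decidable (Spec_data_correction data out) := by unfold Spec_data_correction; infer_instance

-- ===== CLAIM (what is proved, stated in full; the proofs are below) =====
def Claim_equal_data_correction : Prop := ∀ (data : List (List String)), Dom_data_correction data → Pre_data_correction data → Spec_data_correction data (data_correction data)

-- ===== LEMMAS AND PROOFS =====

-- reference form of A's first loop: corrected rows, threading the previous row
def fixRows (prev : List String) : List (List String) → List (List String)
  | [] => []
  | r :: rs =>
    let r' := if prev.getD 1 "" ≠ "" ∧ r.getD 1 "" ≠ prev.getD 1 "" ++ r.getD 2 "" then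
                r.set 1 (prev.getD 1 "" ++ r.getD 2 "")
              else r
    r' :: fixRows r' rs

-- reference form of A's second loop
def emitRows (prev : List String) : List (List String) → List (List String)
  | [] => []
  | r :: rs =>
    (if r.getD 3 "" = "a" then [[r.getD 0 "", prev.getD 1 ""], [r.getD 0 "", r.getD 1 ""]]
     else if r.getD 3 "" = "o" then [[r.getD 0 "", r.getD 1 ""]]
     else []) ++ emitRows r rs

lemma getD_mid (pre : List (List String)) (x : List String) (rest : List (List String)) :
    (pre ++ x :: rest).getD pre.length [] = x := by
  induction pre with
  | nil => simp
  | cons a t ih => simp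

lemma getD_mid1 (pre : List (List String)) (x y : List String) (rest : List (List String)) :
    (pre ++ x :: y :: rest).getD (pre.length + 1) [] = y := by
  induction pre with
  | nil => simp
  | cons a t ih => simp

lemma set_mid1 (pre : List (List String)) (x y v : List String) (rest : List (List String)) :
    (pre ++ x :: y :: rest).set (pre.length + 1) v = pre ++ x :: v :: rest := by
  induction pre with
  | nil => simp
  | cons a t ih => simp [ih]

lemma loop1_eq : ∀ (rest pre : List (List String)) (prev : List String),
    (List.range' (pre.length + 1) rest.length).foldl pyStep1 (pre ++ prev :: rest)
      = pre ++ prev :: fixRows prev rest := by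
  intro rest
  induction rest with
  | nil => intro pre prev; simp [fixRows]
  | cons r rs ih =>
    intro pre prev
    rw [List.length_cons, List.range'_succ, List.foldl_cons]
    set r' := if prev.getD 1 "" ≠ "" ∧ r.getD 1 "" ≠ prev.getD 1 "" ++ r.getD 2 "" then
        r.set 1 (prev.getD 1 "" ++ r.getD 2 "") else r with hr'
    have hstep : pyStep1 (pre ++ prev :: r :: rs) (pre.length + 1) = pre ++ prev :: r' :: rs := by
      unfold pyStep1
      simp only [Nat.add_sub_cancel, getD_mid, getD_mid1, set_mid1]
      rw [hr']
      split <;> rfl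
    have hfix : fixRows prev (r :: rs) = r' :: fixRows r' rs := by rw [hr']; simp [fixRows]
    rw [hstep, hfix]
    have h1 : pre ++ prev :: r' :: rs = (pre ++ [prev]) ++ r' :: rs := by simp
    have h2 : pre.length + 1 + 1 = (pre ++ [prev]).length + 1 := by simp
    rw [h1, h2, ih (pre ++ [prev]) r']
    simp

lemma loop2_eq : ∀ (rest pre : List (List String)) (prev : List String) (acc : List (List String)),
    (List.range' (pre.length + 1) rest.length).foldl (pyStep2 (pre ++ prev :: rest)) acc
      = acc ++ emitRows prev rest := by
  intro rest
  induction rest with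
  | nil => intro pre prev acc; simp [emitRows]
  | cons r rs ih =>
    intro pre prev acc
    rw [List.length_cons, List.range'_succ, List.foldl_cons]
    have hd : pre ++ prev :: r :: rs = (pre ++ [prev]) ++ r :: rs := by simp
    have hstep : pyStep2 (pre ++ prev :: r :: rs) acc (pre.length + 1)
        = acc ++ (if r.getD 3 "" = "a" then [[r.getD 0 "", prev.getD 1 ""], [r.getD 0 "", r.getD 1 ""]]
           else if r.getD 3 "" = "o" then [[r.getD 0 "", r.getD 1 ""]] else []) := by
      unfold pyStep2
      simp only [Nat.add_sub_cancel, getD_mid, getD_mid1]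
      split
      · rfl
      · split <;> simp
    rw [hstep]
    have h2 : pre.length + 1 + 1 = (pre ++ [prev]).length + 1 := by simp
    rw [hd, h2, ih (pre ++ [prev]) r]
    simp [emitRows]

lemma getD1_set1 (r : List String) (v : String) (h : 2 ≤ r.length) :
    (r.set 1 v).getD 1 "" = v := by
  match r with
  | a :: b :: t => simp

lemma getD0_set1 (r : List String) (v : String) : (r.set 1 v).getD 0 "" = r.getD 0 "" := by
  match r with
  | [] => simp
  | a :: t => simp

lemma getD3_set1 (r : List String) (v : String) : (r.set 1 v).getD 3 "" = r.getD 3 "" := by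
  match r with
  | [] => simp
  | [a] => simp
  | a :: b :: t => simp

lemma bridge : ∀ (rs : List (List String)) (prev : List String),
    (∀ r ∈ rs, 2 ≤ r.length) →
    emitRows prev (fixRows prev rs) = emitB (prev.getD 1 "") rs := by
  intro rs
  induction rs with
  | nil => intro prev _; simp [fixRows, emitRows, emitB]
  | cons r rs ih =>
    intro prev hlen
    have hr : 2 ≤ r.length := hlen r (by simp)
    have hrs : ∀ x ∈ rs, 2 ≤ x.length := fun x hx => hlen x (by simp [hx])
    set r' := if prev.getD 1 "" ≠ "" ∧ r.getD 1 "" ≠ prev.getD 1 "" ++ r.getD 2 "" then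
        r.set 1 (prev.getD 1 "" ++ r.getD 2 "") else r with hr'
    have hcur : r'.getD 1 "" = if prev.getD 1 "" = "" then r.getD 1 "" else prev.getD 1 "" ++ r.getD 2 "" := by
      rw [hr']
      by_cases h0 : prev.getD 1 "" = ""
      · rw [if_neg (fun hc => hc.1 h0), if_pos h0]
      · rw [if_neg h0]
        by_cases h1 : r.getD 1 "" = prev.getD 1 "" ++ r.getD 2 ""
        · rw [if_neg (fun hc => hc.2 h1)]; exact h1
        · rw [if_pos ⟨h0, h1⟩]; exact getD1_set1 r _ hr
    have h0' : r'.getD 0 "" = r.getD 0 "" := by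
      rw [hr']; split
      · exact getD0_set1 r _
      · rfl
    have h3' : r'.getD 3 "" = r.getD 3 "" := by
      rw [hr']; split
      · exact getD3_set1 r _
      · rfl
    have hfix : fixRows prev (r :: rs) = r' :: fixRows r' rs := by rw [hr']; simp [fixRows]
    rw [hfix, emitRows, ih r' hrs, hcur, h0', h3']
    rfl

-- ===== VERDICT (by name: the statement is the Claim_ definition above) =====
theorem data_correction_spec : Claim_equal_data_correction := by
  intro data _hdom hpre
  obtain ⟨hne, _hhead, htail⟩ := hpre
  match data, hne with
  | h :: t, _ =>
    unfold Spec_data_correction data_correction data_correction_alt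
    simp only [List.length_cons, Nat.add_sub_cancel]
    have hl1 : (List.range' 1 t.length).foldl pyStep1 (h :: t) = h :: fixRows h t := by
      simpa using loop1_eq t [] h
    rw [hl1]
    simp only [List.length_cons, Nat.add_sub_cancel, List.getD_cons_zero]
    have hl2 : (List.range' 1 (fixRows h t).length).foldl (pyStep2 (h :: fixRows h t))
        [[h.getD 0 "", h.getD 1 ""]] = [[h.getD 0 "", h.getD 1 ""]] ++ emitRows h (fixRows h t) := by
      simpa using loop2_eq (fixRows h t) [] h [[h.getD 0 "", h.getD 1 ""]]
    rw [hl2, bridge t h (fun r hr => le_trans (by norm_num) (htail r hr))]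
    simp
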